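-- pv_equiv track=rewrite | github.com/Himanshu13chib/Argus-2.O | services/security-service/audit_compliance.py | _generate_recommendations
-- ===== SOURCE A (Python) =====
-- from typing import Dict, List, Optional, Any, Tuple
--
-- def _generate_recommendations(findings: List[Dict]) -> List[Dict]:
--     """Generate recommendations based on findings."""
--     recommendations = []
--
--     # Group findings by type and generate recommendations
--     finding_types = {}
--     for finding in findings:
--         rule_id = finding.get('rule_id', 'unknown')
--         if rule_id not in finding_types:
--             finding_types[rule_id] = []
--         finding_types[rule_id].append(finding)
--
--     for rule_id, rule_findings in finding_types.items():
--         if rule_id == 'data_retention':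
--             recommendations.append({
--                 'priority': 'high',
--                 'category': 'data_management',
--                 'title': 'Implement Automated Data Purging',
--                 'description': 'Set up automated processes to purge data according to retention policies',
--                 'estimated_effort': 'medium',
--                 'compliance_impact': 'high'
--             })
--
--         elif rule_id == 'mfa_requirement':
--             recommendations.append({
--                 'priority': 'critical',
--                 'category': 'access_control',
--                 'title': 'Enforce Multi-Factor Authentication',
--                 'description': 'Require MFA for all user accounts, especially privileged users',
--                 'estimated_effort': 'low',
--                 'compliance_impact': 'high'
--             })
--
--         elif rule_id == 'audit_logging_gaps':
--             recommendations.append({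
--                 'priority': 'high',
--                 'category': 'monitoring',
--                 'title': 'Fix Audit Logging Infrastructure',
--                 'description': 'Ensure continuous audit logging with proper monitoring and alerting',
--                 'estimated_effort': 'high',
--                 'compliance_impact': 'critical'
--             })
--
--     return recommendations
-- ===== SOURCE B (Python) =====
-- _REC_TABLE = {
--     'data_retention': {
--         'priority': 'high',
--         'category': 'data_management',
--         'title': 'Implement Automated Data Purging',
--         'description': 'Set up automated processes to purge data according to retention policies',
--         'estimated_effort': 'medium',
--         'compliance_impact': 'high'
--     },
--     'mfa_requirement': {
--         'priority': 'critical',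
--         'category': 'access_control',
--         'title': 'Enforce Multi-Factor Authentication',
--         'description': 'Require MFA for all user accounts, especially privileged users',
--         'estimated_effort': 'low',
--         'compliance_impact': 'high'
--     },
--     'audit_logging_gaps': {
--         'priority': 'high',
--         'category': 'monitoring',
--         'title': 'Fix Audit Logging Infrastructure',
--         'description': 'Ensure continuous audit logging with proper monitoring and alerting',
--         'estimated_effort': 'high',
--         'compliance_impact': 'critical'
--     },
-- }
--
-- def _generate_recommendations(findings):
--     """Generate recommendations based on findings."""
--     recommendations = []
--     seen = set()
--     for finding in findings:
--         rule_id = finding.get('rule_id', 'unknown')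
--         rec = _REC_TABLE.get(rule_id)
--         if rec is not None and rule_id not in seen:
--             seen.add(rule_id)
--             recommendations.append(dict(rec))
--     return recommendations
-- ===== Notes on version B (the rewrite author's own statement) =====
-- stated objective: simpler
-- what changed: Replaces the grouping pass (dict of finding lists) plus if/elif chain over the grouped items with a fixed rule_id->recommendation lookup table and a single pass over findings with a seen-set, appending each matching recommendation at its rule_id's first appearance.
import Mathlib
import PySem

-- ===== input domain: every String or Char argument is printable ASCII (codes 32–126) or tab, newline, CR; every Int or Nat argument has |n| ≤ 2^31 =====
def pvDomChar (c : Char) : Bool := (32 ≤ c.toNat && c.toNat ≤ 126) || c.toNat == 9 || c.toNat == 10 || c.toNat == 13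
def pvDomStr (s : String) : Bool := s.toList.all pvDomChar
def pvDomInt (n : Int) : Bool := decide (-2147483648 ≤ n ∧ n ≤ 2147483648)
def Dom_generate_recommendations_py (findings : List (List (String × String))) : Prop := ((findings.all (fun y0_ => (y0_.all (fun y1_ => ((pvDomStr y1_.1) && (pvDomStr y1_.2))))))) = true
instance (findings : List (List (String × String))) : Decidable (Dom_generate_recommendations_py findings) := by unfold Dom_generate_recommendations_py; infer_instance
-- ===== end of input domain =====

-- B replaces A's grouping dict + if/elif chain over grouped items with a fixed
-- rule_id -> recommendation table and one pass with a seen-set (objective: simpler).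

-- recommendation literals (shared text constants of both sources)
def pvRecRetention : List (String × String) :=
  [("priority", "high"), ("category", "data_management"),
   ("title", "Implement Automated Data Purging"),
   ("description", "Set up automated processes to purge data according to retention policies"),
   ("estimated_effort", "medium"), ("compliance_impact", "high")]

def pvRecMfa : List (String × String) :=
  [("priority", "critical"), ("category", "access_control"),
   ("title", "Enforce Multi-Factor Authentication"),
   ("description", "Require MFA for all user accounts, especially privileged users"),
   ("estimated_effort", "low"), ("compliance_impact", "high")]

def pvRecAudit : List (String × String) :=
  [("priority", "high"), ("category", "monitoring"),
   ("title", "Fix Audit Logging Infrastructure"),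
   ("description", "Ensure continuous audit logging with proper monitoring and alerting"),
   ("estimated_effort", "high"), ("compliance_impact", "critical")]

-- finding.get('rule_id', 'unknown')  (the same expression appears in both sources)
def pvRidOf (finding : List (String × String)) : String :=
  (PySem.Dict.mk finding).getD "rule_id" "unknown"

-- ===== PORT A =====
def generate_recommendations_py (findings : List (List (String × String))) : List (List (String × String)) :=
  -- finding_types = {}; for finding in findings: … group by rule_id
  let finding_types : PySem.Dict String (List (List (String × String))) :=
    findings.foldl (fun d finding =>
      let rule_id := pvRidOf finding
      let d := if d.contains rule_id = false then d.insert rule_id [] else d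
      d.insert rule_id (d.getD rule_id [] ++ [finding])) PySem.Dict.empty
  -- for rule_id, rule_findings in finding_types.items(): if/elif append
  finding_types.items.foldl (fun recommendations kv =>
    if kv.1 == "data_retention" then recommendations ++ [pvRecRetention]
    else if kv.1 == "mfa_requirement" then recommendations ++ [pvRecMfa]
    else if kv.1 == "audit_logging_gaps" then recommendations ++ [pvRecAudit]
    else recommendations) []

-- ===== PORT B =====
-- _REC_TABLE (module-level dict literal)
def pvRecTable : PySem.Dict String (List (String × String)) :=
  PySem.Dict.mk [("data_retention", pvRecRetention),
                 ("mfa_requirement", pvRecMfa),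
                 ("audit_logging_gaps", pvRecAudit)]

def generate_recommendations_py_alt (findings : List (List (String × String))) : List (List (String × String)) :=
  -- seen = set(); single pass, append table entry at first appearance
  (findings.foldl (fun (st : PySem.Set String × List (List (String × String))) finding =>
      let rule_id := pvRidOf finding
      match pvRecTable.get? rule_id with
      | some rec =>
          if PySem.Set.contains st.1 rule_id then st
          else (PySem.Set.add st.1 rule_id, st.2 ++ [rec])
      | none => st) (PySem.Set.empty, [])).2

-- ===== PRECONDITION & SPEC =====
def Spec_generate_recommendations_py (findings : List (List (String × String))) (out : List (List (String × String))) : Prop := out = generate_recommendations_py_alt findings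
instance (findings : List (List (String × String))) (out : List (List (String × String))) : Decidable (Spec_generate_recommendations_py findings out) := by unfold Spec_generate_recommendations_py; infer_instance

-- ===== CLAIM (what is proved, stated in full; the proofs are below) =====
def Claim_equal_generate_recommendations_py : Prop := ∀ (findings : List (List (String × String))), Dom_generate_recommendations_py findings → Spec_generate_recommendations_py findings (generate_recommendations_py findings)

-- ===== LEMMAS AND PROOFS =====

-- table lookup written as A's if/elif chain
def pvRecOf (k : String) : Option (List (String × String)) :=
  if k == "data_retention" then some pvRecRetention
  else if k == "mfa_requirement" then some pvRecMfa
  else if k == "audit_logging_gaps" then some pvRecAudit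
  else none

theorem pvRecTable_get (k : String) : pvRecTable.get? k = pvRecOf k := by
  simp only [pvRecTable, pvRecOf, PySem.Dict.get?, List.find?]
  by_cases h1 : k = "data_retention"
  · subst h1; rfl
  by_cases h2 : k = "mfa_requirement"
  · subst h2; rfl
  by_cases h3 : k = "audit_logging_gaps"
  · subst h3; rfl
  have b1 : ("data_retention" == k) = false := by simp; exact fun h => h1 h.symm
  have b2 : ("mfa_requirement" == k) = false := by simp; exact fun h => h2 h.symm
  have b3 : ("audit_logging_gaps" == k) = false := by simp; exact fun h => h3 h.symm
  simp [b1, b2, b3, h1, h2, h3]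

-- one iteration of A's grouping loop adds the rule_id to the key set
theorem pvStepA_keys (d : PySem.Dict String (List (List (String × String)))) (f : List (String × String)) :
    ((if d.contains (pvRidOf f) = false then d.insert (pvRidOf f) [] else d).insert (pvRidOf f)
      ((if d.contains (pvRidOf f) = false then d.insert (pvRidOf f) [] else d).getD (pvRidOf f) [] ++ [f])).keys
    = PySem.Set.add d.keys (pvRidOf f) := by
  by_cases hc : d.contains (pvRidOf f) = false
  · rw [if_pos hc,
        PySem.Dict.keys_insert_of_contains _ _ (PySem.Dict.contains_insert_self d _ _),
        PySem.Dict.keys_insert_of_not_contains _ _ hc]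
    have hmem : pvRidOf f ∉ d.keys := fun hm => by
      have := (PySem.Dict.contains_iff_mem_keys d _).2 hm
      simp [this] at hc
    simp [PySem.Set.add, PySem.Set.contains, hmem]
  · have hc' : d.contains (pvRidOf f) = true := by
      cases h : d.contains (pvRidOf f) <;> simp_all
    rw [if_neg (by simp [hc']),
        PySem.Dict.keys_insert_of_contains _ _ hc']
    have hmem : pvRidOf f ∈ d.keys := (PySem.Dict.contains_iff_mem_keys d _).1 hc'
    simp [PySem.Set.add, PySem.Set.contains, hmem]

-- keys of A's grouping loop are the distinct rule_ids in first-appearance order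
theorem pvKeysA (l : List (List (String × String)))
    (d : PySem.Dict String (List (List (String × String)))) :
    (l.foldl (fun d finding =>
      let rule_id := pvRidOf finding
      let d := if d.contains rule_id = false then d.insert rule_id [] else d
      d.insert rule_id (d.getD rule_id [] ++ [finding])) d).keys
    = PySem.Set.update d.keys (l.map pvRidOf) := by
  induction l generalizing d with
  | nil => simp [PySem.Set.update]
  | cons f t ih =>
      rw [List.foldl_cons, ih]
      have hstep : ((fun (d : PySem.Dict String (List (List (String × String)))) (finding : List (String × String)) =>
          let rule_id := pvRidOf finding
          let d := if d.contains rule_id = false then d.insert rule_id [] else d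
          d.insert rule_id (d.getD rule_id [] ++ [finding])) d f).keys
          = PySem.Set.add d.keys (pvRidOf f) := pvStepA_keys d f
      rw [hstep]
      simp [PySem.Set.update]

-- A's second loop over the grouped items = filterMap pvRecOf over the keys
theorem pvFoldRec (ps : List (String × List (List (String × String))))
    (acc : List (List (String × String))) :
    ps.foldl (fun recommendations kv =>
      if kv.1 == "data_retention" then recommendations ++ [pvRecRetention]
      else if kv.1 == "mfa_requirement" then recommendations ++ [pvRecMfa]
      else if kv.1 == "audit_logging_gaps" then recommendations ++ [pvRecAudit]
      else recommendations) acc = acc ++ (ps.map (·.1)).filterMap pvRecOf := by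
  induction ps generalizing acc with
  | nil => simp
  | cons kv t ih =>
      rw [List.foldl_cons, List.map_cons, List.filterMap_cons, ih]
      unfold pvRecOf
      split_ifs <;> simp

-- one iteration of B's loop, on the invariant state
theorem pvStepB (rs : List String) (f : List (String × String)) :
    (match pvRecTable.get? (pvRidOf f) with
     | some rec =>
         if PySem.Set.contains ((PySem.Set.ofList rs).filter (fun k => (pvRecOf k).isSome)) (pvRidOf f) = true then
           ((PySem.Set.ofList rs).filter (fun k => (pvRecOf k).isSome),
            (PySem.Set.ofList rs).filterMap pvRecOf)
         else (PySem.Set.add ((PySem.Set.ofList rs).filter (fun k => (pvRecOf k).isSome)) (pvRidOf f),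
               (PySem.Set.ofList rs).filterMap pvRecOf ++ [rec])
     | none => ((PySem.Set.ofList rs).filter (fun k => (pvRecOf k).isSome),
                (PySem.Set.ofList rs).filterMap pvRecOf))
    = ((PySem.Set.ofList (rs ++ [pvRidOf f])).filter (fun k => (pvRecOf k).isSome),
       (PySem.Set.ofList (rs ++ [pvRidOf f])).filterMap pvRecOf) := by
  have hof : PySem.Set.ofList (rs ++ [pvRidOf f])
      = PySem.Set.add (PySem.Set.ofList rs) (pvRidOf f) := by
    simp [PySem.Set.ofList_eq_foldl, List.foldl_append]
  rw [hof, pvRecTable_get]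
  by_cases hmem : pvRidOf f ∈ PySem.Set.ofList rs
  · have hadd : PySem.Set.add (PySem.Set.ofList rs) (pvRidOf f) = PySem.Set.ofList rs := by
      simp [PySem.Set.add, PySem.Set.contains, hmem]
    rw [hadd]
    cases hrec : pvRecOf (pvRidOf f) with
    | none => simp
    | some r =>
        rw [PySem.Set.mem_ofList] at hmem
        simp [hmem, hrec]
  · have hadd : PySem.Set.add (PySem.Set.ofList rs) (pvRidOf f)
        = PySem.Set.ofList rs ++ [pvRidOf f] := by
      simp [PySem.Set.add, PySem.Set.contains, hmem]
    have hmem' : pvRidOf f ∉ rs := by rw [PySem.Set.mem_ofList] at hmem; exact hmem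
    rw [hadd]
    cases hrec : pvRecOf (pvRidOf f) with
    | none => simp [hrec]
    | some r =>
        simp [hrec, hmem', List.filter_append, List.filterMap_append]

-- B's loop invariant
theorem pvFoldB (l : List (List (String × String))) (rs : List String) :
    l.foldl (fun (st : PySem.Set String × List (List (String × String))) finding =>
      let rule_id := pvRidOf finding
      match pvRecTable.get? rule_id with
      | some rec =>
          if PySem.Set.contains st.1 rule_id then st
          else (PySem.Set.add st.1 rule_id, st.2 ++ [rec])
      | none => st)
      ((PySem.Set.ofList rs).filter (fun k => (pvRecOf k).isSome),
       (PySem.Set.ofList rs).filterMap pvRecOf)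
    = ((PySem.Set.ofList (rs ++ l.map pvRidOf)).filter (fun k => (pvRecOf k).isSome),
       (PySem.Set.ofList (rs ++ l.map pvRidOf)).filterMap pvRecOf) := by
  induction l generalizing rs with
  | nil => simp
  | cons f t ih =>
      rw [List.foldl_cons]
      have hstep : ((fun (st : PySem.Set String × List (List (String × String))) finding =>
          let rule_id := pvRidOf finding
          match pvRecTable.get? rule_id with
          | some rec =>
              if PySem.Set.contains st.1 rule_id then st
              else (PySem.Set.add st.1 rule_id, st.2 ++ [rec])
          | none => st)
          ((PySem.Set.ofList rs).filter (fun k => (pvRecOf k).isSome),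
           (PySem.Set.ofList rs).filterMap pvRecOf) f)
          = ((PySem.Set.ofList (rs ++ [pvRidOf f])).filter (fun k => (pvRecOf k).isSome),
             (PySem.Set.ofList (rs ++ [pvRidOf f])).filterMap pvRecOf) := pvStepB rs f
      simp only [hstep]
      rw [ih (rs ++ [pvRidOf f])]
      simp

-- ===== VERDICT (by name: the statement is the Claim_ definition above) =====
theorem generate_recommendations_py_spec : Claim_equal_generate_recommendations_py := by
  intro findings _
  unfold Spec_generate_recommendations_py generate_recommendations_py generate_recommendations_py_alt
  have hAitems :
      ∀ (d : PySem.Dict String (List (List (String × String)))),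
        d.items.foldl (fun recommendations kv =>
          if kv.1 == "data_retention" then recommendations ++ [pvRecRetention]
          else if kv.1 == "mfa_requirement" then recommendations ++ [pvRecMfa]
          else if kv.1 == "audit_logging_gaps" then recommendations ++ [pvRecAudit]
          else recommendations) ([] : List (List (String × String)))
        = d.keys.filterMap pvRecOf := by
    intro d
    have hk : d.keys = d.items.map (·.1) := rfl
    rw [hk]
    exact pvFoldRec d.items []
  rw [hAitems, pvKeysA findings PySem.Dict.empty]
  have hB := pvFoldB findings []
  simp only [List.nil_append] at hB
  have hBstart :
      (((PySem.Set.ofList ([] : List String)).filter (fun k => (pvRecOf k).isSome),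
        (PySem.Set.ofList ([] : List String)).filterMap pvRecOf)
       : PySem.Set String × List (List (String × String)))
      = ((PySem.Set.empty : PySem.Set String), ([] : List (List (String × String)))) := rfl
  rw [hBstart] at hB
  rw [hB]
  have hupd : PySem.Set.update
      (PySem.Dict.empty : PySem.Dict String (List (List (String × String)))).keys
      (findings.map pvRidOf)
      = PySem.Set.ofList (findings.map pvRidOf) := by
    simp [PySem.Set.update, PySem.Set.ofList_eq_foldl, PySem.Dict.empty, PySem.Dict.keys]
  rw [hupd]
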